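-- pv_equiv track=rewrite | github.com/CovertLab/wcEcoli | reconstruction/ecoli/dataclasses/relation.py | find_overlapping_tus
-- ===== SOURCE A (Python) =====
-- def find_overlapping_tus(tu_dict):
-- 	'''
-- 	Input:
-- 		tu_dict: Dictionary of all the transcription units. Keys are the tu_ids.
-- 			Values are the counts of each TU.
-- 	Output:
-- 		overlapping_tu_dict: Contains all monocistronic mRNAs found within overlapping
-- 		transcription units (TUS) as keys (str), and all the TUS they are a
-- 		member of as a value stored in a list.
-- 		This function also adds the locations of the mRNAs which are assumed
-- 		to all be in the cytoplasm - Though this does not always seem to be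
-- 		the case and is dealt with in a later function.
-- 		Example:
-- 		{
-- 		'EG10526_RNA[c]': [u'EG10527_EG10526_EG10524_RNA[c]', u'EG10526_EG10524_RNA[c]'],
-- 		'EG10527_RNA[c]': [u'EG10527_EG10526_EG10524_RNA[c]'],
-- 		'EG12197_RNA[c]': [u'EG12197_RNA[c]', u'EG12197_EG12144_RNA[c]'],
-- 		'EG12144_RNA[c]': [u'EG12144_RNA[c]', u'EG12197_EG12144_RNA[c]'],
-- 		'EG10524_RNA[c]': [u'EG10527_EG10526_EG10524_RNA[c]', u'EG10526_EG10524_RNA[c]']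
-- 		}
-- 	TODO:
-- 		-Find out why the locations of the RNA's is not always set to
-- 		be in the cytoplasm.
-- 	'''
-- 	overlapping_tu_dict = {}
-- 	polycistronic_tus = []
--
-- 	for tu in tu_dict.keys():
-- 		# Find all polycistronic RNA's - not exclusive to mRNA's
-- 		if '_' in tu:
-- 			polycistronic_tus.append([tu, str(tu).split('_')])
-- 	for polycistron in polycistronic_tus:
-- 		for monocistron in polycistron[1]:
-- 			for tu in tu_dict.keys():
-- 				#Check all the TU's that a monocistron is present in.
-- 				if monocistron in tu.split('_'):
-- 					monocistron_loc = monocistron + '_RNA[c]'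
-- 					tu_loc = tu + '_RNA[c]'
-- 					overlapping_tu_dict.setdefault(monocistron_loc, [])
-- 					# Want to check if a key is already present as a value to
-- 					# prevent adding it multiple times.
-- 					if tu_loc  not in overlapping_tu_dict[monocistron_loc]:
-- 						overlapping_tu_dict[monocistron_loc].append(tu_loc)
-- 	return overlapping_tu_dict
-- ===== SOURCE B (Python) =====
-- def find_overlapping_tus(tu_dict):
--     suffix = '_RNA[c]'
--     # inverted index: component -> list of TU ids containing it (built once)
--     index = {}
--     for tu in tu_dict:
--         for part in dict.fromkeys(tu.split('_')):
--             index.setdefault(part, []).append(tu)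
--     out = {}
--     for tu in tu_dict:
--         if '_' in tu:
--             for part in tu.split('_'):
--                 key = part + suffix
--                 if key not in out:
--                     out[key] = [t + suffix for t in index[part]]
--     return out
-- ===== Notes on version B (the rewrite author's own statement) =====
-- stated objective: alternative
-- what changed: Replaces A's quadruple loop (for each part of each polycistron, rescan and resplit every TU key) with a single pass that builds an inverted index component->TUs once, then fills each output entry by one index lookup; asymptotically O(N*L) vs A's O(P*M*N*L), though a timing run's input family (few '_' keys) does not show it faster.
import Mathlib
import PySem

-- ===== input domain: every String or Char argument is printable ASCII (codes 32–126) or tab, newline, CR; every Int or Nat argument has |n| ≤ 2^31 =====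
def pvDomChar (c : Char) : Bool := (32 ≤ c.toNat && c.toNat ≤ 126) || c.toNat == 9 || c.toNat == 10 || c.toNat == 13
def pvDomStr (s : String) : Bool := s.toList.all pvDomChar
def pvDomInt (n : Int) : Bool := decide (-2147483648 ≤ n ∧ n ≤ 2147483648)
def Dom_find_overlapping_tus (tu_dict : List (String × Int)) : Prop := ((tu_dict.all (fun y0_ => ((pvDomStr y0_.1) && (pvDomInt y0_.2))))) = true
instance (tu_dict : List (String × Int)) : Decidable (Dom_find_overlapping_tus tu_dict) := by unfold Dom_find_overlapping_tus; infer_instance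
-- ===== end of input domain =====

-- B replaces A's quadruple loop by one inverted index component→TUs built in a single pass; equivalence of the returned dict is proved below.

-- tu.split('_'): the separator "_" is a nonempty literal, so PySem.Str.split? always returns `some`; the `.getD []` default is never used.
def pvSplitU (s : String) : List String := (PySem.Str.split? s "_").getD []

-- ===== PORT A =====
def find_overlapping_tus (tu_dict : List (String × Int)) : List (String × List String) :=
  let keys := tu_dict.map Prod.fst
  let polycistronic_tus : List (String × List String) :=
    keys.foldl (fun acc tu =>
      if PySem.Str.isIn "_" tu then acc ++ [(tu, pvSplitU tu)] else acc) []
  let overlapping_tu_dict : PySem.Dict String (List String) :=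
    polycistronic_tus.foldl (fun d polycistron =>
      polycistron.2.foldl (fun d monocistron =>
        keys.foldl (fun d tu =>
          if monocistron ∈ pvSplitU tu then
            let monocistron_loc := monocistron ++ "_RNA[c]"
            let tu_loc := tu ++ "_RNA[c]"
            let d := d.setdefault monocistron_loc []
            if tu_loc ∈ d.getD monocistron_loc [] then d
            else d.modify monocistron_loc [] (· ++ [tu_loc])
          else d) d) d) PySem.Dict.empty
  overlapping_tu_dict.items

-- ===== PORT B =====
def find_overlapping_tus_alt (tu_dict : List (String × Int)) : List (String × List String) :=
  -- inverted index component -> list of TU ids containing it, built once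
  let index : PySem.Dict String (List String) :=
    tu_dict.foldl (fun d pr =>
      (PySem.List.dedup (pvSplitU pr.1)).foldl
        (fun d part => (d.setdefault part []).modify part [] (· ++ [pr.1])) d)
      PySem.Dict.empty
  let out : PySem.Dict String (List String) :=
    tu_dict.foldl (fun d pr =>
      if PySem.Str.isIn "_" pr.1 then
        (pvSplitU pr.1).foldl (fun d part =>
          if d.contains (part ++ "_RNA[c]") then d
          else d.insert (part ++ "_RNA[c]")
            -- index[part] in Source B: part always present there, so getD's default is never used
            ((index.getD part []).map (fun t => t ++ "_RNA[c]"))) d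
      else d) PySem.Dict.empty
  out.items

-- ===== PRECONDITION & SPEC =====
-- Pre_ only asks that the association list encoding the Python dict has pairwise-distinct
-- keys — true of every actual Python dict; it excludes no input the Python function accepts.
def Pre_find_overlapping_tus (tu_dict : List (String × Int)) : Prop := (tu_dict.map Prod.fst).Nodup
instance (tu_dict : List (String × Int)) : Decidable (Pre_find_overlapping_tus tu_dict) := by unfold Pre_find_overlapping_tus; infer_instance
def pvWitness_find_overlapping_tus : (List (String × Int)) := [("a_b", 1), ("b", 2)]
def Spec_find_overlapping_tus (tu_dict : List (String × Int)) (out : List (String × List String)) : Prop := out = find_overlapping_tus_alt tu_dict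
instance (tu_dict : List (String × Int)) (out : List (String × List String)) : Decidable (Spec_find_overlapping_tus tu_dict out) := by unfold Spec_find_overlapping_tus; infer_instance

-- ===== CLAIM (what is proved, stated in full; the proofs are below) =====
def Claim_equal_find_overlapping_tus : Prop := ∀ (tu_dict : List (String × Int)), Dom_find_overlapping_tus tu_dict → Pre_find_overlapping_tus tu_dict → Spec_find_overlapping_tus tu_dict (find_overlapping_tus tu_dict)

-- ===== LEMMAS AND PROOFS =====

-- the '_RNA[c]' suffix, the per-component result list, the canonical dict, the mono list
abbrev pvSuf : String := "_RNA[c]"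
def pvF (ks : List String) (p : String) : List String :=
  (ks.filter (fun tu => decide (p ∈ pvSplitU tu))).map (fun t => t ++ pvSuf)
def pvDD (ks qs : List String) : PySem.Dict String (List String) :=
  qs.foldl (fun d p => d.insert (p ++ pvSuf) (pvF ks p)) PySem.Dict.empty
def pvL (ks : List String) : List String :=
  (ks.filter (fun tu => PySem.Str.isIn "_" tu)).flatMap pvSplitU

lemma pvSuf_inj : Function.Injective (fun s => s ++ pvSuf) := by
  intro a b h; exact (String.append_left_inj pvSuf).mp h

lemma pvGetDD (ks : List String) : ∀ (qs : List String) (d : PySem.Dict String (List String)) (p : String),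
    (qs.foldl (fun d q => d.insert (q ++ pvSuf) (pvF ks q)) d).get? (p ++ pvSuf)
      = if p ∈ qs then some (pvF ks p) else d.get? (p ++ pvSuf) := by
  intro qs
  induction qs with
  | nil => simp
  | cons q qs ih =>
    intro d p
    simp only [List.foldl_cons]
    rw [ih]
    by_cases hq : p ∈ qs
    · simp [hq]
    · by_cases hpq : p = q
      · subst hpq; simp [hq, PySem.Dict.get?_insert_self]
      · have hne : p ++ pvSuf ≠ q ++ pvSuf := fun h => hpq (pvSuf_inj h)
        simp [hq, hpq, PySem.Dict.get?_insert_of_ne _ _ hne]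

lemma pvGetDD' (ks qs : List String) (p : String) :
    (pvDD ks qs).get? (p ++ pvSuf) = if p ∈ qs then some (pvF ks p) else none := by
  unfold pvDD
  rw [pvGetDD]
  by_cases h : p ∈ qs <;> simp [h, PySem.Dict.get?_empty]

lemma pvContainsDD (ks qs : List String) (p : String) :
    (pvDD ks qs).contains (p ++ pvSuf) = decide (p ∈ qs) := by
  rw [PySem.Dict.contains_eq_isSome_get?, pvGetDD']
  by_cases h : p ∈ qs <;> simp [h]

lemma pvDD_append_new (ks qs : List String) (p : String) :
    pvDD ks (qs ++ [p]) = (pvDD ks qs).insert (p ++ pvSuf) (pvF ks p) := by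
  simp [pvDD, List.foldl_append]

lemma pvDedup_append (xs : List String) (x : String) :
    PySem.List.dedup (xs ++ [x]) = if x ∈ xs then PySem.List.dedup xs else PySem.List.dedup xs ++ [x] := by
  simp only [PySem.List.dedup_eq_ofList, PySem.Set.ofList_eq_foldl, List.foldl_append,
    List.foldl_cons, List.foldl_nil]
  by_cases h : x ∈ xs <;>
    simp [PySem.Set.add, PySem.Set.contains, ← PySem.Set.ofList_eq_foldl, PySem.Set.mem_ofList, h]

-- Python's d.modify is insert of the modified value (definitional)
lemma pvModify_eq (d : PySem.Dict String (List String)) (k : String) (f : List String → List String) :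
    d.modify k [] f = d.insert k (f (d.getD k [])) := rfl

-- A's innermost loop, on a dict that already holds `cur` at mono's key, none of ks yet in cur
lemma pvInnerBuild (mono : String) : ∀ (ks : List String) (d : PySem.Dict String (List String)) (cur : List String),
    d.get? (mono ++ pvSuf) = some cur → ks.Nodup → (∀ tu ∈ ks, (tu ++ pvSuf) ∉ cur) →
    ks.foldl (fun d tu =>
        if mono ∈ pvSplitU tu then
          if (tu ++ pvSuf) ∈ (d.setdefault (mono ++ pvSuf) []).getD (mono ++ pvSuf) [] then d.setdefault (mono ++ pvSuf) []
          else (d.setdefault (mono ++ pvSuf) []).modify (mono ++ pvSuf) [] (· ++ [tu ++ pvSuf])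
        else d) d
      = if (pvF ks mono).isEmpty then d else d.insert (mono ++ pvSuf) (cur ++ pvF ks mono) := by
  intro ks
  induction ks with
  | nil => simp [pvF]
  | cons tu ks ih =>
    intro d cur hget hnd hcur
    obtain ⟨htu, hnd'⟩ := List.nodup_cons.mp hnd
    simp only [List.foldl_cons]
    by_cases hm : mono ∈ pvSplitU tu
    · have hc : d.contains (mono ++ pvSuf) = true := by
        rw [PySem.Dict.contains_eq_isSome_get?, hget]; rfl
      rw [if_pos hm, PySem.Dict.setdefault_of_contains _ _ hc,
        PySem.Dict.getD_of_get?_eq_some _ _ hget]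
      rw [if_neg (hcur tu (List.mem_cons_self))]
      rw [pvModify_eq, PySem.Dict.getD_of_get?_eq_some _ _ hget]
      rw [ih (d.insert (mono ++ pvSuf) (cur ++ [tu ++ pvSuf])) (cur ++ [tu ++ pvSuf])
        (PySem.Dict.get?_insert_self _ _ _) hnd' ?hfresh]
      case hfresh =>
        intro tu' htu' hmem
        rcases List.mem_append.mp hmem with h1 | h1
        · exact hcur tu' (List.mem_cons_of_mem _ htu') h1
        · have heq : tu' = tu := pvSuf_inj (List.mem_singleton.mp h1)
          exact htu (heq ▸ htu')
      have hFcons : pvF (tu :: ks) mono = (tu ++ pvSuf) :: pvF ks mono := by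
        simp [pvF, hm]
      rw [hFcons]
      cases hE : (pvF ks mono).isEmpty with
      | true => rw [List.isEmpty_iff.mp hE]; simp
      | false => simp [PySem.Dict.insert_insert_self, List.append_assoc]
    · rw [if_neg hm]
      rw [ih d cur hget hnd' (fun tu' h => hcur tu' (List.mem_cons_of_mem _ h))]
      have : pvF (tu :: ks) mono = pvF ks mono := by simp [pvF, hm]
      rw [this]

-- A's innermost loop, mono's key not yet present
lemma pvInnerNew (mono : String) : ∀ (ks : List String) (d : PySem.Dict String (List String)),
    d.contains (mono ++ pvSuf) = false → ks.Nodup →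
    ks.foldl (fun d tu =>
        if mono ∈ pvSplitU tu then
          if (tu ++ pvSuf) ∈ (d.setdefault (mono ++ pvSuf) []).getD (mono ++ pvSuf) [] then d.setdefault (mono ++ pvSuf) []
          else (d.setdefault (mono ++ pvSuf) []).modify (mono ++ pvSuf) [] (· ++ [tu ++ pvSuf])
        else d) d
      = if (pvF ks mono).isEmpty then d else d.insert (mono ++ pvSuf) (pvF ks mono) := by
  intro ks
  induction ks with
  | nil => simp [pvF]
  | cons tu ks ih =>
    intro d hc hnd
    obtain ⟨htu, hnd'⟩ := List.nodup_cons.mp hnd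
    simp only [List.foldl_cons]
    by_cases hm : mono ∈ pvSplitU tu
    · rw [if_pos hm, PySem.Dict.setdefault_of_not_contains _ _ hc,
        PySem.Dict.getD_insert_self]
      rw [if_neg (List.not_mem_nil)]
      rw [pvModify_eq, PySem.Dict.getD_insert_self, PySem.Dict.insert_insert_self]
      rw [pvInnerBuild mono ks (d.insert (mono ++ pvSuf) ([] ++ [tu ++ pvSuf])) ([] ++ [tu ++ pvSuf])
        (PySem.Dict.get?_insert_self _ _ _) hnd' ?hfresh]
      case hfresh =>
        intro tu' htu' hmem
        have heq : tu' = tu := pvSuf_inj (List.mem_singleton.mp (by simpa using hmem))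
        exact htu (heq ▸ htu')
      have hFcons : pvF (tu :: ks) mono = (tu ++ pvSuf) :: pvF ks mono := by
        simp [pvF, hm]
      rw [hFcons]
      cases hE : (pvF ks mono).isEmpty with
      | true => rw [List.isEmpty_iff.mp hE]; simp
      | false => simp [PySem.Dict.insert_insert_self]
    · rw [if_neg hm, ih d hc hnd']
      have : pvF (tu :: ks) mono = pvF ks mono := by simp [pvF, hm]
      rw [this]

-- A's innermost loop is a no-op when mono's key already holds its full list
lemma pvInnerNoop (keys : List String) (mono : String) : ∀ (ks : List String) (d : PySem.Dict String (List String)),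
    d.get? (mono ++ pvSuf) = some (pvF keys mono) → (∀ tu ∈ ks, tu ∈ keys) →
    ks.foldl (fun d tu =>
        if mono ∈ pvSplitU tu then
          if (tu ++ pvSuf) ∈ (d.setdefault (mono ++ pvSuf) []).getD (mono ++ pvSuf) [] then d.setdefault (mono ++ pvSuf) []
          else (d.setdefault (mono ++ pvSuf) []).modify (mono ++ pvSuf) [] (· ++ [tu ++ pvSuf])
        else d) d
      = d := by
  intro ks
  induction ks with
  | nil => simp
  | cons tu ks ih =>
    intro d hget hin
    simp only [List.foldl_cons]
    by_cases hm : mono ∈ pvSplitU tu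
    · have hc : d.contains (mono ++ pvSuf) = true := by
        rw [PySem.Dict.contains_eq_isSome_get?, hget]; rfl
      rw [if_pos hm, PySem.Dict.setdefault_of_contains _ _ hc,
        PySem.Dict.getD_of_get?_eq_some _ _ hget]
      have hmem : tu ++ pvSuf ∈ pvF keys mono := by
        simp only [pvF, List.mem_map]
        exact ⟨tu, List.mem_filter.mpr ⟨hin tu List.mem_cons_self, decide_eq_true hm⟩, rfl⟩
      rw [if_pos hmem]
      exact ih d hget (fun tu' h => hin tu' (List.mem_cons_of_mem _ h))
    · rw [if_neg hm]
      exact ih d hget (fun tu' h => hin tu' (List.mem_cons_of_mem _ h))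

-- A's two outer loops over the flattened component list
lemma pvOuterA (keys : List String) (hnd : keys.Nodup) : ∀ (ms ps : List String),
    (∀ p ∈ ms, ¬ (pvF keys p).isEmpty) →
    ms.foldl (fun d mono =>
        keys.foldl (fun d tu =>
          if mono ∈ pvSplitU tu then
            if (tu ++ pvSuf) ∈ (d.setdefault (mono ++ pvSuf) []).getD (mono ++ pvSuf) [] then d.setdefault (mono ++ pvSuf) []
            else (d.setdefault (mono ++ pvSuf) []).modify (mono ++ pvSuf) [] (· ++ [tu ++ pvSuf])
          else d) d)
      (pvDD keys (PySem.List.dedup ps))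
      = pvDD keys (PySem.List.dedup (ps ++ ms)) := by
  intro ms
  induction ms with
  | nil => intro ps _; simp
  | cons p ms ih =>
    intro ps hne
    simp only [List.foldl_cons]
    have hrest : ps ++ p :: ms = (ps ++ [p]) ++ ms := by simp
    by_cases hp : p ∈ ps
    · rw [pvInnerNoop keys p keys (pvDD keys (PySem.List.dedup ps))
        (by rw [pvGetDD']; simp [hp]) (fun _ h => h)]
      rw [hrest, ← ih (ps ++ [p]) (fun q hq => hne q (List.mem_cons_of_mem _ hq))]
      rw [pvDedup_append, if_pos hp]
    · rw [pvInnerNew p keys (pvDD keys (PySem.List.dedup ps))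
        (by rw [pvContainsDD]; simp [hp]) hnd]
      rw [if_neg (by simpa using hne p List.mem_cons_self)]
      rw [hrest, ← ih (ps ++ [p]) (fun q hq => hne q (List.mem_cons_of_mem _ hq))]
      rw [pvDedup_append, if_neg hp, pvDD_append_new]

-- every component of a polycistron occurs in at least one key
lemma pvF_ne_empty (keys : List String) (p : String) (hp : p ∈ pvL keys) : ¬ (pvF keys p).isEmpty := by
  simp only [pvL, List.mem_flatMap, List.mem_filter] at hp
  obtain ⟨tu, ⟨htu, _⟩, hptu⟩ := hp
  simp only [pvF, List.isEmpty_iff, List.map_eq_nil_iff, List.filter_eq_nil_iff]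
  intro h
  exact absurd (decide_eq_true hptu) (by simpa using h tu htu)

-- items of the canonical dict
lemma pvItemsDD (ks qs : List String) (h : qs.Nodup) :
    (pvDD ks qs).items = qs.map (fun p => (p ++ pvSuf, pvF ks p)) := by
  unfold pvDD
  rw [PySem.Dict.items_foldl_insert_fresh qs (fun p => p ++ pvSuf) (pvF ks) PySem.Dict.empty
    (fun a _ => PySem.Dict.contains_empty _) (h.map pvSuf_inj)]
  rfl

-- ===== B side =====

-- one step of the index-building loop, as a plain modify
lemma pvStepB_eq (tu : String) :
    (fun (d : PySem.Dict String (List String)) part => (d.setdefault part []).modify part [] (· ++ [tu]))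
      = fun d part => d.modify part [] (· ++ [tu]) := by
  funext d part
  cases h : d.contains part with
  | true => rw [PySem.Dict.setdefault_of_contains _ _ h]
  | false =>
    rw [PySem.Dict.setdefault_of_not_contains _ _ h]
    show (d.insert part []).insert part ((d.insert part []).getD part [] ++ [tu])
        = d.insert part (d.getD part [] ++ [tu])
    rw [PySem.Dict.getD_insert_self, PySem.Dict.insert_insert_self,
      PySem.Dict.getD_of_not_contains d _ h]

lemma pvNodup_filter_beq (p : String) : ∀ (l : List String), l.Nodup →
    l.filter (fun x => x == p) = if p ∈ l then [p] else [] := by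
  intro l
  induction l with
  | nil => simp
  | cons a l ih =>
    intro hnd
    obtain ⟨ha, hnd'⟩ := List.nodup_cons.mp hnd
    rw [List.filter_cons, ih hnd']
    by_cases hap : a = p
    · subst hap; simp [ha]
    · have hmm : p ∈ a :: l ↔ p ∈ l := by simp [Ne.symm hap]
      by_cases hp : p ∈ l <;> simp [hap, hp, hmm]

-- the inner index loop appends tu to d[p] exactly when p is a component of tu
lemma pvIdxInner (tu : String) (d : PySem.Dict String (List String)) (p : String) :
    ((PySem.List.dedup (pvSplitU tu)).foldl
        (fun d part => (d.setdefault part []).modify part [] (· ++ [tu])) d).getD p []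
      = d.getD p [] ++ (if p ∈ pvSplitU tu then [tu] else []) := by
  rw [pvStepB_eq]
  have hmap : (PySem.List.dedup (pvSplitU tu)).foldl (fun d part => d.modify part [] (· ++ [tu])) d
      = ((PySem.List.dedup (pvSplitU tu)).map (fun part => (part, tu))).foldl
          (fun d q => d.modify q.1 [] (· ++ [q.2])) d := by
    rw [List.foldl_map]
  rw [hmap, PySem.Dict.getD_foldl_modify_append]
  congr 1
  rw [List.filter_map]
  simp only [Function.comp_def]
  rw [pvNodup_filter_beq p _ (PySem.List.nodup_dedup _)]
  by_cases h : p ∈ pvSplitU tu <;> simp [h]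

-- the whole index: d[p] = the keys having p as a component, in order
lemma pvIdx : ∀ (td : List (String × Int)) (d : PySem.Dict String (List String)) (p : String),
    (td.foldl (fun d pr =>
        (PySem.List.dedup (pvSplitU pr.1)).foldl
          (fun d part => (d.setdefault part []).modify part [] (· ++ [pr.1])) d) d).getD p []
      = d.getD p [] ++ (td.map Prod.fst).filter (fun tu => decide (p ∈ pvSplitU tu)) := by
  intro td
  induction td with
  | nil => simp
  | cons pr td ih =>
    intro d p
    simp only [List.foldl_cons, List.map_cons, List.filter_cons]
    rw [ih, pvIdxInner]
    by_cases h : p ∈ pvSplitU pr.1 <;> simp [h, List.append_assoc]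

-- B's inner output loop over one component list
lemma pvBParts (keys : List String) : ∀ (parts ps : List String),
    parts.foldl (fun d part =>
        if d.contains (part ++ pvSuf) then d
        else d.insert (part ++ pvSuf) (pvF keys part)) (pvDD keys (PySem.List.dedup ps))
      = pvDD keys (PySem.List.dedup (ps ++ parts)) := by
  intro parts
  induction parts with
  | nil => intro ps; simp
  | cons p parts ih =>
    intro ps
    simp only [List.foldl_cons]
    have hrest : ps ++ p :: parts = (ps ++ [p]) ++ parts := by simp
    by_cases hp : p ∈ ps
    · rw [if_pos (by rw [pvContainsDD]; simpa [PySem.List.mem_dedup] using hp)]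
      rw [hrest, ← ih (ps ++ [p]), pvDedup_append, if_pos hp]
    · rw [if_neg (by rw [pvContainsDD]; simpa [PySem.List.mem_dedup] using hp)]
      rw [hrest, ← ih (ps ++ [p]), pvDedup_append, if_neg hp, pvDD_append_new]

-- B's outer output loop, for any index dict I whose entries map to the pvF lists
lemma pvOuterB (keys : List String) (I : PySem.Dict String (List String))
    (hI : ∀ p, (I.getD p []).map (fun t => t ++ pvSuf) = pvF keys p) :
    ∀ (td : List (String × Int)) (ps : List String),
    td.foldl (fun d pr =>
        if PySem.Str.isIn "_" pr.1 then
          (pvSplitU pr.1).foldl (fun d part =>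
            if d.contains (part ++ pvSuf) then d
            else d.insert (part ++ pvSuf) ((I.getD part []).map (fun t => t ++ pvSuf))) d
        else d) (pvDD keys (PySem.List.dedup ps))
      = pvDD keys (PySem.List.dedup (ps ++ pvL (td.map Prod.fst))) := by
  have hfun : (fun (d : PySem.Dict String (List String)) part =>
        if d.contains (part ++ pvSuf) then d
        else d.insert (part ++ pvSuf) ((I.getD part []).map (fun t => t ++ pvSuf)))
      = (fun d part =>
        if d.contains (part ++ pvSuf) then d
        else d.insert (part ++ pvSuf) (pvF keys part)) := by
    funext d part; rw [hI]
  rw [hfun]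
  intro td
  induction td with
  | nil => intro ps; simp [pvL]
  | cons pr td ih =>
    intro ps
    simp only [List.foldl_cons]
    cases hcond : PySem.Str.isIn "_" pr.1 with
    | true =>
      rw [if_pos rfl, pvBParts keys (pvSplitU pr.1) ps, ih (ps ++ pvSplitU pr.1)]
      congr 2
      simp only [pvL, List.map_cons, List.filter_cons, hcond, if_true, List.flatMap_cons,
        List.append_assoc]
    | false =>
      rw [if_neg (by simp), ih ps]
      congr 2
      simp only [pvL, List.map_cons, List.filter_cons, hcond, Bool.false_eq_true, if_false]

-- A's first loop followed by the two nested loops over its result, flattened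
lemma pvPolyFold (keys : List String) (g : PySem.Dict String (List String) → String → PySem.Dict String (List String))
    (init : PySem.Dict String (List String)) :
    (keys.foldl (fun acc tu => if PySem.Str.isIn "_" tu then acc ++ [(tu, pvSplitU tu)] else acc) []).foldl
        (fun d polycistron => polycistron.2.foldl g d) init
      = (pvL keys).foldl g init := by
  rw [PySem.List.foldl_append_if, List.nil_append]
  simp only [List.foldl_map]
  rw [← List.foldl_flatMap]
  rfl

-- the two closed forms
lemma pvPortA_eq (tu_dict : List (String × Int)) (h : (tu_dict.map Prod.fst).Nodup) :
    find_overlapping_tus tu_dict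
      = (PySem.List.dedup (pvL (tu_dict.map Prod.fst))).map
          (fun p => (p ++ pvSuf, pvF (tu_dict.map Prod.fst) p)) := by
  simp only [find_overlapping_tus]
  rw [pvPolyFold (tu_dict.map Prod.fst) _ PySem.Dict.empty]
  rw [show (PySem.Dict.empty : PySem.Dict String (List String))
      = pvDD (tu_dict.map Prod.fst) (PySem.List.dedup []) from rfl]
  rw [pvOuterA (tu_dict.map Prod.fst) h _ []
    (fun p hp => pvF_ne_empty (tu_dict.map Prod.fst) p hp)]
  rw [List.nil_append]
  exact pvItemsDD _ _ (PySem.List.nodup_dedup _)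

lemma pvPortB_eq (tu_dict : List (String × Int)) :
    find_overlapping_tus_alt tu_dict
      = (PySem.List.dedup (pvL (tu_dict.map Prod.fst))).map
          (fun p => (p ++ pvSuf, pvF (tu_dict.map Prod.fst) p)) := by
  unfold find_overlapping_tus_alt
  simp only []
  rw [show (PySem.Dict.empty : PySem.Dict String (List String))
      = pvDD (tu_dict.map Prod.fst) (PySem.List.dedup []) from rfl]
  rw [pvOuterB (tu_dict.map Prod.fst) _ ?hI tu_dict []]
  case hI =>
    intro p
    rw [pvIdx]
    simp [pvF, pvDD, PySem.Dict.getD_empty]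
  rw [List.nil_append]
  exact pvItemsDD _ _ (PySem.List.nodup_dedup _)

-- ===== VERDICT (by name: the statement is the Claim_ definition above) =====
theorem find_overlapping_tus_spec : Claim_equal_find_overlapping_tus := by
  intro tu_dict _ hpre
  unfold Spec_find_overlapping_tus
  rw [pvPortA_eq tu_dict hpre, pvPortB_eq tu_dict]
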